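-- pv_equiv track=rewrite | github.com/jeanleopoldo/str8ts_solver | init.py | getColElements
-- ===== SOURCE A (Python) =====
-- def getColElements(grid, row, col, elements):
--     if row == -1:
--         return elements
--
--     element = grid[row][col]
--     elements.append(element)
--
--     if grid[row-1][col] == -1:
--         return elements
--     return getColElements(grid, (row-1), col, elements)
-- ===== SOURCE B (Python) =====
-- def getColElements(grid, row, col, elements):
--     # Two-phase: first locate the stop row (first row going down whose row-above
--     # holds the -1 sentinel), then bulk-extend elements with that column segment.
--     if row == -1:
--         return elements
--     stop = 0
--     for r in range(row, 0, -1):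
--         if grid[r - 1][col] == -1:
--             stop = r
--             break
--     elements.extend(grid[r][col] for r in range(row, stop - 1, -1))
--     return elements
-- ===== Notes on version B (the rewrite author's own statement) =====
-- stated objective: alternative
-- what changed: Replaces A's tail recursion with its interleaved per-step sentinel test by a two-phase iteration: first a scan locates the stop row (the first row going down whose row above holds the -1 sentinel), then the whole column segment is appended in one bulk extend over a range.
-- outside the precondition, e.g. on getColElements([[0], [7, -1], [2, 5]], 2, 1, []): A returns [5], B returns [5]; on getColElements([[-1], [5], [7]], -2, 0, []): A returns [5], B returns []
import Mathlib
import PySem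

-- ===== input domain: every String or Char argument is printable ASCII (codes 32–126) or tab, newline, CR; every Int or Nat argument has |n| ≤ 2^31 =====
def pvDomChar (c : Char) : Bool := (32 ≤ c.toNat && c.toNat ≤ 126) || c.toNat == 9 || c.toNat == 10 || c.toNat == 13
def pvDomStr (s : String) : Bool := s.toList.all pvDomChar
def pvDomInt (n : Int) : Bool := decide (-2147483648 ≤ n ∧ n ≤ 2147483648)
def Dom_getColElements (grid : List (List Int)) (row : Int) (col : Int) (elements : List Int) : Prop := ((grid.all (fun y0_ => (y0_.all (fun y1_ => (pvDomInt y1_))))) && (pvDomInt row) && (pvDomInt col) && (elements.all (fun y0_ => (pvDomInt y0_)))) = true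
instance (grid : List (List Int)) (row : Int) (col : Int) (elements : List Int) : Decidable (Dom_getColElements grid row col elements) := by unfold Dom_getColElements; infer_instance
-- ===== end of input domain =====

-- B replaces A's interleaved tail recursion by a two-phase computation (locate the
-- sentinel stop row, then bulk-append the column segment); objective: alternative.
-- Both versions mutate `elements` in Python (append vs extend) — same observable
-- mutation; the theorems here are about the returned value.

-- ===== PORT A =====
-- grid[r][c] as Python computes it: none = IndexError (negative indices wrap)
def pvGet2 (grid : List (List Int)) (r c : Int) : Option Int :=
  match PySem.List.pyGet? grid r with
  | none => none
  | some rowL => PySem.List.pyGet? rowL c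

-- fuel only makes A's recursion total; on Pre_ inputs the fuel never runs out
def getColElementsGo : Nat → List (List Int) → Int → Int → List Int → List Int
  | 0, _, _, _, elements => elements
  | fuel+1, grid, row, col, elements =>
    if row = -1 then elements
    else
      match pvGet2 grid row col with
      | none => elements        -- Python raises IndexError here (outside Pre_)
      | some element =>
        let elements := elements ++ [element]
        match pvGet2 grid (row-1) col with
        | none => elements      -- Python raises IndexError here (outside Pre_)
        | some v =>
          if v = -1 then elements
          else getColElementsGo fuel grid (row-1) col elements

def getColElements (grid : List (List Int)) (row : Int) (col : Int) (elements : List Int) : List Int :=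
  getColElementsGo ((row + 1).toNat + 1) grid row col elements

-- ===== PORT B =====
def getColElements_alt (grid : List (List Int)) (row : Int) (col : Int) (elements : List Int) : List Int :=
  if row = -1 then elements
  else
    let stop : Int :=
      match (PySem.List.pyRange row 0 (-1)).find? (fun r => pvGet2 grid (r - 1) col == some (-1)) with
      | some r => r
      | none => 0
    elements ++ (PySem.List.pyRange row (stop - 1) (-1)).map (fun r => (pvGet2 grid r col).getD 0)

-- ===== PRECONDITION & SPEC =====
-- Pre_ excludes inputs where A raises IndexError, plus two kinds of inputs where A
-- still returns: row < -1 (A's value there comes from Python's negative-index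
-- wraparound, an accident of the implementation) and ragged grids where a row at or
-- below `row` (or the last row) is shorter than col+1 yet the sentinel stops the
-- scan before A touches it.
def Pre_getColElements (grid : List (List Int)) (row : Int) (col : Int) (elements : List Int) : Prop :=
  row = -1 ∨ (0 ≤ row ∧ row < (grid.length : Int) ∧ 0 ≤ col ∧
    (∀ r ∈ List.range (row.toNat + 1), col < ((grid.getD r []).length : Int)) ∧
    col < ((grid.getLastD []).length : Int))
instance (grid : List (List Int)) (row : Int) (col : Int) (elements : List Int) : Decidable (Pre_getColElements grid row col elements) := by unfold Pre_getColElements; infer_instance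

def pvWitness_getColElements : List (List Int) × Int × Int × List Int := ([[1], [2]], 1, 0, [])

def Spec_getColElements (grid : List (List Int)) (row : Int) (col : Int) (elements : List Int) (out : List Int) : Prop := out = getColElements_alt grid row col elements
instance (grid : List (List Int)) (row : Int) (col : Int) (elements : List Int) (out : List Int) : Decidable (Spec_getColElements grid row col elements out) := by unfold Spec_getColElements; infer_instance

-- ===== CLAIM (what is proved, stated in full; the proofs are below) =====
def Claim_equal_getColElements : Prop := ∀ (grid : List (List Int)) (row : Int) (col : Int) (elements : List Int), Dom_getColElements grid row col elements → Pre_getColElements grid row col elements → Spec_getColElements grid row col elements (getColElements grid row col elements)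

-- ===== LEMMAS AND PROOFS =====

theorem pvGet2_some (grid : List (List Int)) (r : Nat) (col : Int)
    (hr : r < grid.length) (hc0 : 0 ≤ col) (hc : col < ((grid.getD r []).length : Int)) :
    pvGet2 grid (r : Int) col = some ((grid.getD r []).getD col.toNat 0) := by
  unfold pvGet2
  rw [PySem.List.pyGet?_ofNat _ _ hr]
  have hlt : col.toNat < (grid.getD r []).length := by omega
  have hgd : grid[r] = grid.getD r [] := (List.getD_eq_getElem _ _ hr).symm
  rw [hgd]
  show PySem.List.pyGet? (grid.getD r []) col = _
  rw [PySem.List.pyGet?_of_nonneg _ hc0, List.getElem?_eq_getElem hlt,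
    List.getD_eq_getElem _ _ hlt]

theorem pvGet2_neg_one (grid : List (List Int)) (col : Int)
    (hne : grid ≠ []) (hc0 : 0 ≤ col) (hc : col < ((grid.getLastD []).length : Int)) :
    pvGet2 grid (-1) col = some ((grid.getLastD []).getD col.toNat 0) := by
  unfold pvGet2
  rw [PySem.List.pyGet?_neg_one, List.getLast?_eq_some_getLast hne]
  have hlt : col.toNat < (grid.getLastD []).length := by omega
  have hgd : grid.getLast hne = grid.getLastD [] := by
    cases grid with
    | nil => exact absurd rfl hne
    | cons x xs => simp [List.getLastD_eq_getLast?, List.getLast?_eq_some_getLast]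
  rw [hgd]
  show PySem.List.pyGet? (grid.getLastD []) col = _
  rw [PySem.List.pyGet?_of_nonneg _ hc0, List.getElem?_eq_getElem hlt,
    List.getD_eq_getElem _ _ hlt]

-- one successful step of A's recursion
theorem go_succ (fuel : Nat) (grid : List (List Int)) (row col : Int) (elements : List Int)
    (a b : Int) (hrow : ¬ row = -1)
    (ha : pvGet2 grid row col = some a) (hb : pvGet2 grid (row - 1) col = some b) :
    getColElementsGo (fuel + 1) grid row col elements =
      if b = -1 then elements ++ [a]
      else getColElementsGo fuel grid (row - 1) col (elements ++ [a]) := by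
  simp only [getColElementsGo, if_neg hrow, ha, hb]

-- B peels off the topmost row of its segment in the same way
theorem alt_step (grid : List (List Int)) (row col : Int) (elements : List Int) (a b : Int)
    (hrow : 0 < row)
    (ha : pvGet2 grid row col = some a) (hb : pvGet2 grid (row - 1) col = some b) :
    getColElements_alt grid row col elements =
      if b = -1 then elements ++ [a]
      else getColElements_alt grid (row - 1) col (elements ++ [a]) := by
  have h1 : ¬ row = -1 := by omega
  have h2 : ¬ row - 1 = -1 := by omega
  simp only [getColElements_alt, if_neg h1, if_neg h2]
  rw [PySem.List.pyRange_neg_one_cons (show (0 : Int) < row from hrow)]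
  by_cases hbv : b = -1
  · rw [List.find?_cons_of_pos
      (by show (pvGet2 grid (row - 1) col == some (-1)) = true; rw [hb, hbv]; rfl)]
    dsimp only
    rw [if_pos hbv,
      PySem.List.pyRange_neg_one_cons (show row - 1 < row by omega),
      PySem.List.pyRange_neg_one_eq_nil (le_refl (row - 1))]
    simp [ha]
  · rw [List.find?_cons_of_neg
      (by show ¬ (pvGet2 grid (row - 1) col == some (-1)) = true; rw [hb]; simp [hbv])]
    rw [if_neg hbv]
    cases hf : (PySem.List.pyRange (row - 1) 0 (-1)).find?
        (fun r => pvGet2 grid (r - 1) col == some (-1)) with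
    | none =>
      rw [PySem.List.pyRange_neg_one_cons (show (0 : Int) - 1 < row by omega)]
      simp [ha, List.append_assoc]
    | some s =>
      have hs := (PySem.List.mem_pyRange_neg_one).mp (List.mem_of_find?_eq_some hf)
      rw [PySem.List.pyRange_neg_one_cons (show s - 1 < row by omega)]
      simp [ha, List.append_assoc]

-- the key induction: A with exact fuel n+2 equals B at row n, for any accumulator
theorem key (n : Nat) (grid : List (List Int)) (col : Int) (elements : List Int)
    (hn : n < grid.length) (hc0 : 0 ≤ col)
    (hall : ∀ r : Nat, r ≤ n → col < ((grid.getD r []).length : Int))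
    (hlast : col < ((grid.getLastD []).length : Int)) :
    getColElementsGo (n + 2) grid (n : Int) col elements = getColElements_alt grid (n : Int) col elements := by
  induction n generalizing elements with
  | zero =>
    have hne : grid ≠ [] := by intro h; simp [h] at hn
    have h0 : pvGet2 grid (0 : Int) col = some ((grid.getD 0 []).getD col.toNat 0) := by
      exact_mod_cast pvGet2_some grid 0 col hn hc0 (hall 0 (by omega))
    have hm1 : pvGet2 grid ((0 : Int) - 1) col = some ((grid.getLastD []).getD col.toNat 0) := by
      rw [show (0 : Int) - 1 = -1 by ring]; exact pvGet2_neg_one grid col hne hc0 hlast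
    have hr1 : PySem.List.pyRange (0 : Int) 0 (-1) = [] :=
      PySem.List.pyRange_neg_one_eq_nil (by omega)
    have hr2 : PySem.List.pyRange (0 : Int) (0 - 1) (-1) = [0] := by
      rw [PySem.List.pyRange_neg_one_cons (by omega), PySem.List.pyRange_neg_one_eq_nil (by omega)]
    simp only [Nat.cast_zero, getColElementsGo, getColElements_alt, h0, hm1, hr1,
      List.find?_nil, hr2, List.map]
    split <;> simp
  | succ m ih =>
    have hcst : ((m + 1 : Nat) : Int) = (m : Int) + 1 := by push_cast; ring
    have ha : pvGet2 grid ((m : Int) + 1) col = some ((grid.getD (m + 1) []).getD col.toNat 0) := by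
      have := pvGet2_some grid (m + 1) col hn hc0 (hall (m + 1) le_rfl)
      rwa [hcst] at this
    have hb : pvGet2 grid ((m : Int) + 1 - 1) col = some ((grid.getD m []).getD col.toNat 0) := by
      rw [show (m : Int) + 1 - 1 = (m : Int) by ring]
      exact pvGet2_some grid m col (by omega) hc0 (hall m (by omega))
    rw [hcst]
    rw [show m + 1 + 2 = (m + 2) + 1 from rfl,
      go_succ (m + 2) grid ((m : Int) + 1) col elements _ _ (by omega) ha hb,
      alt_step grid ((m : Int) + 1) col elements _ _ (by omega) ha hb]
    by_cases hv : (grid.getD m []).getD col.toNat 0 = -1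
    · rw [if_pos hv, if_pos hv]
    · rw [if_neg hv, if_neg hv, show (m : Int) + 1 - 1 = (m : Int) by ring]
      exact ih _ (by omega) (fun r hr => hall r (by omega))

-- ===== VERDICT (by name: the statement is the Claim_ definition above) =====
theorem getColElements_spec : Claim_equal_getColElements := by
  intro grid row col elements _ hpre
  unfold Spec_getColElements getColElements
  rcases hpre with h | ⟨hr0, hrlen, hc0, hall, hlast⟩
  · subst h
    simp [getColElementsGo, getColElements_alt]
  · obtain ⟨n, rfl⟩ : ∃ n : Nat, row = (n : Int) := ⟨row.toNat, by omega⟩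
    have hfuel : ((n : Int) + 1).toNat + 1 = n + 2 := by omega
    rw [hfuel]
    exact key n grid col elements (by omega) hc0
      (fun r hr => hall r (by rw [List.mem_range]; omega)) hlast
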